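-- pv_equiv track=rewrite | github.com/Thilanka0824/computer_science_career_path | Basic_Python_Data_Structures_and_Objects/Dictionaries/count_first_letter.py | count_first_letter
-- ===== SOURCE A (Python) =====
-- def count_first_letter(names):
--   letter_count = {}
--   for key in names:
--     first_letter = key[0]
--     if first_letter not in letter_count:
--         letter_count[first_letter] = 0
--     letter_count[first_letter] += len(names[key])
--   return letter_count
-- ===== SOURCE B (Python) =====
-- def count_first_letter(names):
--     # collect the distinct first letters in first-appearance order, then
--     # aggregate each group's total in one grouped-sum pass per letter
--     letters = []
--     for key in names:
--         first = key[0]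
--         if first not in letters:
--             letters.append(first)
--     return {f: sum(len(names[k]) for k in names if k[0] == f) for f in letters}
-- ===== Notes on version B (the rewrite author's own statement) =====
-- stated objective: alternative
-- what changed: Replaces A's single-pass incremental dict accumulation by a two-phase group-and-aggregate: first collect the distinct first letters in order of first appearance, then build each result entry with a per-letter grouped sum over the keys.
import Mathlib
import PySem

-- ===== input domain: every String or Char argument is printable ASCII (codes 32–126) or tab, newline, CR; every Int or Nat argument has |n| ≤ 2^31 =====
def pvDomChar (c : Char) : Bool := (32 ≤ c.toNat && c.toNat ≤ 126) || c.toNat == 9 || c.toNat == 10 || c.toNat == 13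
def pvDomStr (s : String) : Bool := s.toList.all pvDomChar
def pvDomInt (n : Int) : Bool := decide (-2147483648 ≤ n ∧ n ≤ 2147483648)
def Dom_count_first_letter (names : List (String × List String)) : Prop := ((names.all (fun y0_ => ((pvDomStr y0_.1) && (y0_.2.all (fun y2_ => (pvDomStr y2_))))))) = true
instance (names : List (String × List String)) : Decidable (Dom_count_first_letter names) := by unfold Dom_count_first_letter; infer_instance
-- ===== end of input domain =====

-- B re-implements A as a two-phase group-and-aggregate (distinct first letters, then one
-- grouped sum per letter) instead of A's incremental per-key dict accumulation; same cost class.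

-- ===== PORT A =====
-- key[0] as a 1-character string (Python raises IndexError on ""; those inputs are outside Pre_)
def pvFirst (k : String) : String :=
  match PySem.Str.pyGet? k 0 with
  | some c => String.ofList [c]
  | none => ""

def count_first_letter (names : List (String × List String)) : List (String × Int) :=
  (names.foldl (fun d kv =>
      let first_letter := pvFirst kv.1
      let d' := if d.contains first_letter then d else d.insert first_letter 0
      d'.insert first_letter (d'.getD first_letter 0 + (((PySem.Dict.mk names).getD kv.1 []).length : Int)))
    PySem.Dict.empty).items

-- ===== PORT B =====
def count_first_letter_alt (names : List (String × List String)) : List (String × Int) :=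
  let letters : PySem.Set String :=
    names.foldl (fun ls kv => PySem.Set.add ls (pvFirst kv.1)) PySem.Set.empty
  letters.map (fun f =>
    (f, ((names.filter (fun kv => pvFirst kv.1 == f)).map
          (fun kv => (((PySem.Dict.mk names).getD kv.1 []).length : Int))).sum))

-- ===== PRECONDITION & SPEC =====
-- Pre_ excludes exactly the inputs with an empty-string key, on which A's key[0] raises IndexError.
def Pre_count_first_letter (names : List (String × List String)) : Prop :=
  ∀ kv ∈ names, kv.1 ≠ ""
instance (names : List (String × List String)) : Decidable (Pre_count_first_letter names) := by
  unfold Pre_count_first_letter; infer_instance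
def pvWitness_count_first_letter : (List (String × List String)) :=
  [("alice", ["x", "y"]), ("bob", []), ("anna", ["z"])]

def Spec_count_first_letter (names : List (String × List String)) (out : List (String × Int)) : Prop := out = count_first_letter_alt names
instance (names : List (String × List String)) (out : List (String × Int)) : Decidable (Spec_count_first_letter names out) := by unfold Spec_count_first_letter; infer_instance

-- ===== CLAIM (what is proved, stated in full; the proofs are below) =====
def Claim_equal_count_first_letter : Prop := ∀ (names : List (String × List String)), Dom_count_first_letter names → Pre_count_first_letter names → Spec_count_first_letter names (count_first_letter names)

-- ===== LEMMAS AND PROOFS =====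

-- A's two-step body (setdefault-then-add) is one overwrite-insert.
lemma stepA_eq (d : PySem.Dict String Int) (f : String) (v : Int) :
    (let d' := if d.contains f then d else d.insert f 0
     d'.insert f (d'.getD f 0 + v)) = d.insert f (d.getD f 0 + v) := by
  by_cases h : d.contains f = true
  · simp [h]
  · have h0 : d.getD f 0 = 0 := PySem.Dict.getD_of_not_contains d 0 (by simpa using h)
    simp [h, h0, PySem.Dict.getD_insert_self, PySem.Dict.insert_insert_self]

-- Running total at letter f after A's fold = initial value + grouped sum at f.
lemma getD_foldA (g : (String × List String) → Int) (l : List (String × List String))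
    (d : PySem.Dict String Int) (f : String) :
    (l.foldl (fun d kv => d.insert (pvFirst kv.1) (d.getD (pvFirst kv.1) 0 + g kv)) d).getD f 0
      = d.getD f 0 + ((l.filter (fun kv => pvFirst kv.1 == f)).map g).sum := by
  induction l generalizing d with
  | nil => simp
  | cons kv t ih =>
    simp only [List.foldl_cons, ih, List.filter_cons]
    by_cases h : pvFirst kv.1 = f
    · simp [h, PySem.Dict.getD_insert_self]
      ring
    · simp [PySem.Dict.getD_insert, h, Ne.symm h]

-- ===== VERDICT (by name: the statement is the Claim_ definition above) =====
theorem count_first_letter_spec : Claim_equal_count_first_letter := by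
  intro names _ _
  unfold Spec_count_first_letter count_first_letter count_first_letter_alt
  have hstep :
      names.foldl (fun d kv =>
          let first_letter := pvFirst kv.1
          let d' := if d.contains first_letter then d else d.insert first_letter 0
          d'.insert first_letter (d'.getD first_letter 0 + (((PySem.Dict.mk names).getD kv.1 []).length : Int)))
        PySem.Dict.empty
      = names.foldl (fun d kv =>
          d.insert (pvFirst kv.1) (d.getD (pvFirst kv.1) 0 + (((PySem.Dict.mk names).getD kv.1 []).length : Int)))
        PySem.Dict.empty := by
    apply PySem.List.foldl_congr_mem
    intro d kv _
    exact stepA_eq d (pvFirst kv.1) _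
  rw [hstep]
  have hnd : (names.foldl (fun d kv => d.insert (pvFirst kv.1)
        (d.getD (pvFirst kv.1) 0 + (((PySem.Dict.mk names).getD kv.1 []).length : Int)))
      PySem.Dict.empty).keys.Nodup :=
    PySem.Dict.nodup_keys_foldl_insert_key names (fun kv => pvFirst kv.1) _ _ PySem.Dict.nodup_keys_empty
  rw [PySem.Dict.items_eq_map_keys _ hnd 0, PySem.Dict.keys_foldl_insert_key]
  have hkeys : PySem.Set.update (PySem.Dict.empty : PySem.Dict String Int).keys (names.map fun kv => pvFirst kv.1)
      = names.foldl (fun ls kv => PySem.Set.add ls (pvFirst kv.1)) PySem.Set.empty := by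
    simp [PySem.Set.update, List.foldl_map, PySem.Set.empty]
  rw [hkeys]
  refine List.map_congr_left ?_
  intro f hf
  rw [getD_foldA]
  simp
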